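-- pv_equiv track=rewrite | github.com/giumontebruno/bankpromos | bankpromos/core/normalizer.py | _contains_fuel_signal
-- ===== SOURCE A (Python) =====
-- def _contains_fuel_signal(text: str) -> bool:
--     text_lower = text.lower()
--     fuel_signals = {
--         "combustible", "estacion de servicio", "estacion", "shell", "copetrol",
--         "petropar", "petrobras", "enex", "nafta", "diesel", "gnc", "gasolina",
--         "reintegro combustible", "descuento combustible", "estacion shell",
--     }
--     for signal in fuel_signals:
--         if signal in text_lower:
--             return True
--     return False
-- ===== SOURCE B (Python) =====
-- _FUEL_SIGNALS = (
--     "combustible", "estacion de servicio", "estacion", "shell", "copetrol",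
--     "petropar", "petrobras", "enex", "nafta", "diesel", "gnc", "gasolina",
--     "reintegro combustible", "descuento combustible", "estacion shell",
-- )
--
--
-- def _contains_fuel_signal(text: str) -> bool:
--     # Single left-to-right pass over the lowered text: at each position,
--     # check whether any signal starts there (instead of one full substring
--     # scan per keyword).
--     t = text.lower()
--     return any(
--         any(t.startswith(sig, i) for sig in _FUEL_SIGNALS)
--         for i in range(len(t) + 1)
--     )
-- ===== Notes on version B (the rewrite author's own statement) =====
-- stated objective: alternative
-- what changed: Replaces the per-keyword full-text substring scan with a single positional sweep over the lowered text that at each index checks whether any keyword starts there.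
import Mathlib
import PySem

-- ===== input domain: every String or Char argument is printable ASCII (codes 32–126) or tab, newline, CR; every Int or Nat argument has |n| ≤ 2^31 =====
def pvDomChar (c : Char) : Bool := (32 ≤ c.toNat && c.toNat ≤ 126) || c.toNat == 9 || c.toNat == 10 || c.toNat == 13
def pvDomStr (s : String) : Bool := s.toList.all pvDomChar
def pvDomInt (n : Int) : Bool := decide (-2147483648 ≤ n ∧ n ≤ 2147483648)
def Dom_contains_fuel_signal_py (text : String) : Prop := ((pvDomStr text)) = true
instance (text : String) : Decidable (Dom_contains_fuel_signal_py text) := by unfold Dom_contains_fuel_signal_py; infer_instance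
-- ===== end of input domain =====

-- Header: B replaces A's per-keyword substring scan with one positional sweep over the lowered text (alternative decomposition, same cost).

-- the constant keyword set (both programs use the same literals)
def fuelSignals : List String :=
  ["combustible", "estacion de servicio", "estacion", "shell", "copetrol",
   "petropar", "petrobras", "enex", "nafta", "diesel", "gnc", "gasolina",
   "reintegro combustible", "descuento combustible", "estacion shell"]

-- ===== PORT A =====
-- the 'for signal in fuel_signals: if signal in text_lower: return True' loop
def fuelLoopA : List String → String → Bool
  | [], _ => false
  | s :: rest, t => if PySem.Str.isIn s t then true else fuelLoopA rest t

def contains_fuel_signal_py (text : String) : Bool :=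
  let text_lower := PySem.Str.lower text
  fuelLoopA (PySem.Set.ofList fuelSignals) text_lower

-- ===== PORT B =====
-- inner 'any(t.startswith(sig, i) for sig in _FUEL_SIGNALS)';
-- t.startswith(sig, i) with 0 ≤ i is exactly 'sig.toList <+: t.drop i', ported via Chars.startswith on the dropped suffix
def sigAt : List String → List Char → Nat → Bool
  | [], _, _ => false
  | s :: rest, t, i => if PySem.Chars.startswith (t.drop i) s.toList then true else sigAt rest t i

-- outer 'any(... for i in range(len(t) + 1))'
def posLoop : List Int → List Char → Bool
  | [], _ => false
  | i :: is, t => if sigAt fuelSignals t i.toNat then true else posLoop is t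

def contains_fuel_signal_py_alt (text : String) : Bool :=
  let t := (PySem.Str.lower text).toList
  posLoop (PySem.List.pyRange 0 ((t.length : Int) + 1) 1) t


-- ===== PRECONDITION & SPEC =====
def Spec_contains_fuel_signal_py (text : String) (out : Bool) : Prop := out = contains_fuel_signal_py_alt text
instance (text : String) (out : Bool) : Decidable (Spec_contains_fuel_signal_py text out) := by unfold Spec_contains_fuel_signal_py; infer_instance

-- ===== CLAIM (what is proved, stated in full; the proofs are below) =====
def Claim_equal_contains_fuel_signal_py : Prop := ∀ (text : String), Dom_contains_fuel_signal_py text → Spec_contains_fuel_signal_py text (contains_fuel_signal_py text)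

-- ===== LEMMAS AND PROOFS =====

lemma fuelLoopA_iff (sigs : List String) (t : String) :
    fuelLoopA sigs t = true ↔ ∃ s ∈ sigs, PySem.Str.isIn s t = true := by
  induction sigs with
  | nil => simp [fuelLoopA]
  | cons s rest ih =>
    simp only [fuelLoopA]
    split_ifs with h
    · exact ⟨fun _ => ⟨s, List.mem_cons_self .., h⟩, fun _ => rfl⟩
    · rw [ih]
      constructor
      · rintro ⟨x, hx, hxin⟩
        exact ⟨x, List.mem_cons_of_mem _ hx, hxin⟩
      · rintro ⟨x, hx, hxin⟩
        rcases List.mem_cons.mp hx with rfl | hx'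
        · exact absurd hxin h
        · exact ⟨x, hx', hxin⟩

lemma sigAt_iff (sigs : List String) (t : List Char) (i : Nat) :
    sigAt sigs t i = true ↔ ∃ s ∈ sigs, s.toList <+: t.drop i := by
  induction sigs with
  | nil => simp [sigAt]
  | cons s rest ih =>
    simp only [sigAt]
    split_ifs with h
    · exact ⟨fun _ => ⟨s, List.mem_cons_self .., (PySem.Chars.startswith_iff _ _).mp h⟩,
        fun _ => rfl⟩
    · rw [ih]
      constructor
      · rintro ⟨x, hx, hxin⟩
        exact ⟨x, List.mem_cons_of_mem _ hx, hxin⟩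
      · rintro ⟨x, hx, hxin⟩
        rcases List.mem_cons.mp hx with rfl | hx'
        · exact absurd ((PySem.Chars.startswith_iff _ _).mpr hxin) h
        · exact ⟨x, hx', hxin⟩

lemma posLoop_iff (is : List Int) (t : List Char) :
    posLoop is t = true ↔ ∃ i ∈ is, sigAt fuelSignals t i.toNat = true := by
  induction is with
  | nil => simp [posLoop]
  | cons i rest ih =>
    simp only [posLoop]
    split_ifs with h
    · exact ⟨fun _ => ⟨i, List.mem_cons_self .., h⟩, fun _ => rfl⟩
    · rw [ih]
      constructor
      · rintro ⟨x, hx, hxin⟩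
        exact ⟨x, List.mem_cons_of_mem _ hx, hxin⟩
      · rintro ⟨x, hx, hxin⟩
        rcases List.mem_cons.mp hx with rfl | hx'
        · exact absurd hxin h
        · exact ⟨x, hx', hxin⟩

lemma fuelSignals_ne_nil : ∀ s ∈ fuelSignals, s.toList ≠ [] := by decide

lemma ports_agree (text : String) :
    contains_fuel_signal_py text = contains_fuel_signal_py_alt text := by
  rw [Bool.eq_iff_iff]
  show fuelLoopA _ _ = true ↔ posLoop _ _ = true
  rw [fuelLoopA_iff, posLoop_iff]
  constructor
  · rintro ⟨s, hs, hin⟩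
    rw [PySem.Set.mem_ofList] at hs
    rw [PySem.Str.isIn_iff_infix] at hin
    obtain ⟨j, hj⟩ :=
      (PySem.Chars.exists_prefix_drop_iff_isIn s.toList (PySem.Str.lower text).toList).mpr
        ((PySem.Chars.isIn_iff_infix _ _).mpr hin)
    have hjlen : j ≤ (PySem.Str.lower text).toList.length := by
      by_contra hgt
      push Not at hgt
      rw [List.drop_eq_nil_of_le (le_of_lt hgt)] at hj
      exact fuelSignals_ne_nil s hs (List.prefix_nil.mp hj)
    refine ⟨(j : Int), ?_, ?_⟩
    · rw [PySem.List.mem_pyRange_one]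
      constructor
      · positivity
      · omega
    · rw [sigAt_iff]
      exact ⟨s, hs, by simpa using hj⟩
  · rintro ⟨i, hi, hsig⟩
    rw [sigAt_iff] at hsig
    obtain ⟨s, hs, hpre⟩ := hsig
    refine ⟨s, (PySem.Set.mem_ofList _ _).mpr hs, ?_⟩
    rw [PySem.Str.isIn_iff_infix]
    exact hpre.isInfix.trans (List.drop_suffix _ _).isInfix

-- ===== VERDICT (by name: the statement is the Claim_ definition above) =====
theorem contains_fuel_signal_py_spec : Claim_equal_contains_fuel_signal_py := by
  intro text _
  unfold Spec_contains_fuel_signal_py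
  exact ports_agree text
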